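-- pv_equiv track=rewrite | github.com/Yanbing-Chen/Faster-R-CNN | vision_for_anchor.py | get_vgg_output_length
-- ===== SOURCE A (Python) =====
-- def get_vgg_output_length(height, width):
--     def get_output_length(input_length):
--         filter_sizes    = [2, 2, 2, 2]
--         padding         = [0, 0, 0, 0]
--         stride          = 2
--         for i in range(4):
--             input_length = (input_length + 2 * padding[i] - filter_sizes[i]) // stride + 1
--         return input_length
--     return get_output_length(height), get_output_length(width)
-- ===== SOURCE B (Python) =====
-- def get_vgg_output_length(height, width):
--     # Each of the four stride-2/filter-2/padding-0 stages maps L to (L-2)//2+1 = L//2,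
--     # so four stages compose to a single floor division by 16.
--     return height // 16, width // 16
-- ===== Notes on version B (the rewrite author's own statement) =====
-- stated objective: simpler
-- what changed: Replaced the four-iteration loop with a closed-form floor division by 16, using (L-2)//2+1 = L//2 composed four times.
import Mathlib
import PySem

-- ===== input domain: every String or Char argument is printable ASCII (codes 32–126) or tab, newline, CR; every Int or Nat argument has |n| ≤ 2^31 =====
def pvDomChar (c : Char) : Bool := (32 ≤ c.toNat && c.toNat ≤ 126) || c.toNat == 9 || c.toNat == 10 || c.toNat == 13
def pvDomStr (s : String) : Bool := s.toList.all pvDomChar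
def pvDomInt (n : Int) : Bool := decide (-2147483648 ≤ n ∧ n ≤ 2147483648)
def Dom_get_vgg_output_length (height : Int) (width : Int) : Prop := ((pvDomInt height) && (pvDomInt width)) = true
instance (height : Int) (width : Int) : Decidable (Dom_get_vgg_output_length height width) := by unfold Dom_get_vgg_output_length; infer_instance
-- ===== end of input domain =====

-- B replaces A's four-iteration stride-2 convolution-size loop with a single closed-form floor division by 16 (simpler).


-- ===== PORT A =====
-- inner helper get_output_length: loop over range(4), same state (input_length)
def pvGetOutputLength (input_length : Int) : Int :=
  let filter_sizes : List Int := [2, 2, 2, 2]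
  let padding : List Int := [0, 0, 0, 0]
  let stride : Int := 2
  (PySem.List.pyRange 0 4 1).foldl
    (fun acc i =>
      PySem.Int.floordiv (acc + 2 * (PySem.List.pyGetD padding i 0) - (PySem.List.pyGetD filter_sizes i 0)) stride + 1)
    input_length

def get_vgg_output_length (height : Int) (width : Int) : Int × Int :=
  (pvGetOutputLength height, pvGetOutputLength width)

-- ===== PORT B =====
def get_vgg_output_length_alt (height : Int) (width : Int) : Int × Int :=
  (PySem.Int.floordiv height 16, PySem.Int.floordiv width 16)

-- ===== PRECONDITION & SPEC =====
def Spec_get_vgg_output_length (height : Int) (width : Int) (out : Int × Int) : Prop := out = get_vgg_output_length_alt height width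
instance (height : Int) (width : Int) (out : Int × Int) : Decidable (Spec_get_vgg_output_length height width out) := by unfold Spec_get_vgg_output_length; infer_instance

-- ===== CLAIM (what is proved, stated in full; the proofs are below) =====
def Claim_equal_get_vgg_output_length : Prop := ∀ (height : Int) (width : Int), Dom_get_vgg_output_length height width → Spec_get_vgg_output_length height width (get_vgg_output_length height width)

-- ===== LEMMAS AND PROOFS =====

-- one stage (L - 2) // 2 + 1 equals L // 2; four stages compose to division by 16
lemma pvGetOutputLength_eq (n : Int) : pvGetOutputLength n = PySem.Int.floordiv n 16 := by
  unfold pvGetOutputLength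
  rw [show PySem.List.pyRange 0 4 1 = [0, 1, 2, 3] from by decide]
  simp only [List.foldl_cons, List.foldl_nil]
  simp only [PySem.List.pyGetD, PySem.List.pyGet?, PySem.List.pyIdx?, PySem.Int.floordiv,
    Int.fdiv_eq_ediv_of_nonneg _ (by norm_num : (0:Int) ≤ 2),
    Int.fdiv_eq_ediv_of_nonneg _ (by norm_num : (0:Int) ≤ 16)]
  norm_num [show Int.toNat 2 = 2 from rfl, show Int.toNat 3 = 3 from rfl]
  omega

-- ===== VERDICT (by name: the statement is the Claim_ definition above) =====
theorem get_vgg_output_length_spec : Claim_equal_get_vgg_output_length := by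
  intro h w _
  unfold Spec_get_vgg_output_length get_vgg_output_length get_vgg_output_length_alt
  rw [pvGetOutputLength_eq, pvGetOutputLength_eq]
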